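-- pv_equiv track=rewrite | github.com/synaptent/RingRift | ai-service/scripts/run_profile_tournament.py | generate_configurations
-- ===== SOURCE A (Python) =====
-- def generate_configurations(num_players: int) -> list[tuple[str, ...]]:
--     """
--     Generate all unique configurations for testing profile A vs profile B.
--
--     For 3 players, generates:
--     - (A, B, B) - A at position 1
--     - (B, A, B) - A at position 2
--     - (B, B, A) - A at position 3
--     - (A, A, B) - B at position 3
--     - (A, B, A) - B at position 2
--     - (B, A, A) - B at position 1
--
--     Returns list of tuples indicating profile assignment per position.
--     """
--     configs = []
--
--     # Test "1 A vs rest B" - A at each position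
--     for a_pos in range(num_players):
--         config = tuple("B" if i != a_pos else "A" for i in range(num_players))
--         configs.append(config)
--
--     # Test "1 B vs rest A" - B at each position
--     for b_pos in range(num_players):
--         config = tuple("A" if i != b_pos else "B" for i in range(num_players))
--         configs.append(config)
--
--     return configs
-- ===== SOURCE B (Python) =====
-- def generate_configurations(num_players: int) -> list[tuple[str, ...]]:
--     configs = []
--     row = ("A",) + ("B",) * (num_players - 1)
--     for _ in range(num_players):
--         configs.append(row)
--         row = row[-1:] + row[:-1]  # rotate right: the marker walks one step to the right
--     row = ("B",) + ("A",) * (num_players - 1)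
--     for _ in range(num_players):
--         configs.append(row)
--         row = row[-1:] + row[:-1]
--     return configs
-- ===== Notes on version B (the rewrite author's own statement) =====
-- stated objective: alternative
-- what changed: B generates each configuration from the previous one by a one-step right rotation of a seed row (row[-1:] + row[:-1]) for each of the two seeds 'A'+ 'B'*(n-1) and 'B'+'A'*(n-1), instead of A's rebuilding every row from scratch with an index-comparison scan over range(num_players).
import Mathlib
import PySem

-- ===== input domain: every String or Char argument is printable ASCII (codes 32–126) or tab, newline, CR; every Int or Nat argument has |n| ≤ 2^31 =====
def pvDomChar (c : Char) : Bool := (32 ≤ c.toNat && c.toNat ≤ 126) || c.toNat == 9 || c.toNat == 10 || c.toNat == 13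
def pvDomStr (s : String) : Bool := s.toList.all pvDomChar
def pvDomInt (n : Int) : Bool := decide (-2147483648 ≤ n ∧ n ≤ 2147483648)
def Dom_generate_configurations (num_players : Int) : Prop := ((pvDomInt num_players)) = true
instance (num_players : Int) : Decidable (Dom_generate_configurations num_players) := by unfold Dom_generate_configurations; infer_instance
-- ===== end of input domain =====

-- B generates each config from the previous one by a one-step right rotation (row[-1:] + row[:-1]) of a seed row,
-- instead of A's per-row scan of range(num_players) with an index comparison (alternative algorithm, same cost).

-- ===== PORT A =====
def generate_configurations (num_players : Int) : List (List String) :=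
  let configs : List (List String) :=
    (PySem.List.pyRange 0 num_players 1).foldl (fun acc a_pos =>
      acc ++ [(PySem.List.pyRange 0 num_players 1).map (fun i => if i ≠ a_pos then "B" else "A")]) []
  (PySem.List.pyRange 0 num_players 1).foldl (fun acc b_pos =>
    acc ++ [(PySem.List.pyRange 0 num_players 1).map (fun i => if i ≠ b_pos then "A" else "B")]) configs

-- ===== PORT B =====
-- row[-1:] + row[:-1]  (one-step right rotation)
def pvRot (r : List String) : List String :=
  PySem.List.slice r (some (-1)) none ++ PySem.List.slice r none (some (-1))

def generate_configurations_alt (num_players : Int) : List (List String) :=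
  let s1 := (PySem.List.pyRange 0 num_players 1).foldl
    (fun st _ => (st.1 ++ [st.2], pvRot st.2))
    (([] : List (List String)), "A" :: List.replicate (num_players - 1).toNat "B")
  let s2 := (PySem.List.pyRange 0 num_players 1).foldl
    (fun st _ => (st.1 ++ [st.2], pvRot st.2))
    (s1.1, "B" :: List.replicate (num_players - 1).toNat "A")
  s2.1

-- ===== PRECONDITION & SPEC =====
def Spec_generate_configurations (num_players : Int) (out : List (List String)) : Prop := out = generate_configurations_alt num_players
instance (num_players : Int) (out : List (List String)) : Decidable (Spec_generate_configurations num_players out) := by unfold Spec_generate_configurations; infer_instance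

-- ===== CLAIM =====
def Claim_equal_generate_configurations : Prop := ∀ (num_players : Int), Dom_generate_configurations num_players → Spec_generate_configurations num_players (generate_configurations num_players)

-- ===== LEMMAS AND PROOFS =====

-- rotating a list whose last element is a moves a to the front
theorem pvRot_concat (l : List String) (a : String) : pvRot (l ++ [a]) = a :: l := by
  unfold pvRot
  rw [PySem.List.slice_from_neg_one, PySem.List.slice_to_neg_one]
  simp

-- the fold in B unrolls to the iterates of pvRot
theorem pvFoldlRot (l : List Int) (acc : List (List String)) (row : List String) :
    (l.foldl (fun st _ => (st.1 ++ [st.2], pvRot st.2)) (acc, row)).1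
      = acc ++ (List.range l.length).map (fun k => pvRot^[k] row) := by
  induction l generalizing acc row with
  | nil => simp
  | cons x xs ih =>
    simp only [List.foldl_cons, ih, List.length_cons, List.range_succ_eq_map]
    simp [List.map_map, Function.comp_def, Function.iterate_succ_apply]

-- k right-rotations of the seed put the marker x at index k
theorem pvRotIter (N k : Nat) (hk : k < N) (x y : String) :
    pvRot^[k] (x :: List.replicate (N - 1) y)
      = List.replicate k y ++ x :: List.replicate (N - 1 - k) y := by
  induction k with
  | zero => simp
  | succ k ih =>
    have hkN : k < N := Nat.lt_of_succ_lt hk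
    have hm : N - 1 - k = (N - 1 - (k + 1)) + 1 := by omega
    rw [Function.iterate_succ_apply', ih hkN, hm, List.replicate_succ']
    have : List.replicate k y ++ x :: (List.replicate (N - 1 - (k + 1)) y ++ [y])
        = (List.replicate k y ++ x :: List.replicate (N - 1 - (k + 1)) y) ++ [y] := by simp
    rw [this, pvRot_concat]
    simp [List.replicate_succ]

-- A's index-comparison row is the same one-hot list
theorem pvScanRow (N k : Nat) (hk : k < N) (x y : String) :
    (List.range N).map (fun j => if j = k then x else y)
      = List.replicate k y ++ x :: List.replicate (N - 1 - k) y := by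
  induction N generalizing k with
  | zero => omega
  | succ N ih =>
    rw [List.range_succ, List.map_append]
    by_cases h : k = N
    · subst h
      have hall : ∀ j ∈ List.range k, (if j = k then x else y) = y := by
        intro j hj
        simp only [List.mem_range] at hj
        simp [Nat.ne_of_lt hj]
      rw [List.map_congr_left hall]
      simp
    · have hkN : k < N := by omega
      have hNk : ¬ (N = k) := fun e => h (Eq.symm e)
      rw [ih k hkN]
      simp only [List.map_cons, List.map_nil, if_neg hNk]
      rw [show N + 1 - 1 - k = (N - 1 - k) + 1 by omega, List.replicate_succ']
      simp

-- one half of the outputs agree: A's map over range-of-rows vs B's rotation iterates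
theorem pvHalf (n : Int) (x y : String) :
    (PySem.List.pyRange 0 n 1).map
        (fun a => (PySem.List.pyRange 0 n 1).map (fun i => if i ≠ a then y else x))
      = (List.range (PySem.List.pyRange 0 n 1).length).map
          (fun k => pvRot^[k] (x :: List.replicate (n - 1).toNat y)) := by
  rw [PySem.List.length_pyRange_one, PySem.List.pyRange_one]
  simp only [List.map_map, Function.comp_def, zero_add, Int.sub_zero]
  apply List.map_congr_left
  intro k hk
  simp only [List.mem_range] at hk
  have h1 : (n - 1).toNat = n.toNat - 1 := by omega
  rw [h1, pvRotIter n.toNat k hk x y, ← pvScanRow n.toNat k hk x y]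
  apply List.map_congr_left
  intro j _
  by_cases h : j = k
  · simp [h]
  · have : (j : Int) ≠ (k : Int) := by exact_mod_cast h
    simp [h, this]

-- ===== VERDICT =====
theorem generate_configurations_spec : Claim_equal_generate_configurations := by
  intro n _
  unfold Spec_generate_configurations generate_configurations generate_configurations_alt
  rw [PySem.List.foldl_append_singleton_eq_map, PySem.List.foldl_append_singleton_eq_map,
    List.nil_append, pvFoldlRot, pvFoldlRot, List.nil_append]
  rw [pvHalf n "A" "B", pvHalf n "B" "A"]
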